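-- pv_equiv track=rewrite | github.com/pypi-data/pypi-mirror-392 | packages/localcosmos-server/localcosmos_server-0.24.9.tar.gz/localcosmos_server-0.24.9/localcosmos_server/tests/common.py | powersetdic
-- ===== SOURCE A (Python) =====
-- def powersetdic(d):
--
--     keys = list(d.keys())
--
--     r = [[]]
--     rd = [{}]
--
--     for e in keys:
--         r += [ls+[e] for ls in r]
--
--     for b in r:
--
--         if len(b) > 0:
--             subdic = {}
--             for key in b:
--                 subdic[key] = d[key]
--
--             rd.append(subdic)
--
--     return rd
-- ===== SOURCE B (Python) =====
-- def powersetdic(d):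
--     keys = list(d.keys())
--     n = len(keys)
--     result = []
--     for i in range(2 ** n):
--         sub = {}
--         for j in range(n):
--             if (i >> j) & 1:
--                 k = keys[j]
--                 sub[k] = d[k]
--         result.append(sub)
--     return result
-- ===== Notes on version B (the rewrite author's own statement) =====
-- stated objective: alternative
-- what changed: Enumerates subsets directly by integer bitmask 0..2^n-1 (bit j selects keys[j]), building each sub-dict in one pass, instead of doubling a list of key-lists and then turning the nonempty ones into dicts in a second pass.
import Mathlib
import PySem

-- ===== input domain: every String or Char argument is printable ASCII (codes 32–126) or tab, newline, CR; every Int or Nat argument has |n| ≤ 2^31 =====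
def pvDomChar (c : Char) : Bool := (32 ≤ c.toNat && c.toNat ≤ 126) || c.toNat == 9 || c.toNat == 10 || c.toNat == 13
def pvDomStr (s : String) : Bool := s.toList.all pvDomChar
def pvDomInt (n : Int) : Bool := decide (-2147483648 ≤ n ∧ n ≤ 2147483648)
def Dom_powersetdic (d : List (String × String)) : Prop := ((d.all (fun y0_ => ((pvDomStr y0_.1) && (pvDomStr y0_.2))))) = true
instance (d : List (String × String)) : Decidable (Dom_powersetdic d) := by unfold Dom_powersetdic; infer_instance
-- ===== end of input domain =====

-- B enumerates subsets by integer bitmask in one pass instead of A's list-doubling plus a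
-- second dict-building pass; same values, different construction (objective: alternative).

-- ===== PORT A =====
-- the dict argument, as Python receives it (duplicate keys in the assoc list collapse as in dict())
def powersetdic (d : List (String × String)) : List (List (String × String)) :=
  let dd := PySem.Dict.ofList d
  let keys := dd.keys                              -- keys = list(d.keys())
  let r := keys.foldl (fun r e => r ++ r.map (fun ls => ls ++ [e])) [[]]
  r.foldl (fun rd b =>
    if b.length > 0 then
      -- subdic = {}; for key in b: subdic[key] = d[key]   (key is always present, so d[key] = getD)
      rd ++ [(b.foldl (fun sub key => sub.insert key (dd.getD key "")) PySem.Dict.empty).items]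
    else rd) [([] : List (String × String))]

-- ===== PORT B =====
def powersetdic_alt (d : List (String × String)) : List (List (String × String)) :=
  let dd := PySem.Dict.ofList d
  let keys := dd.keys
  let n := keys.length
  (List.range (2 ^ n)).map (fun i =>
    ((List.range n).foldl (fun sub j =>
        if (i >>> j) % 2 = 1 then
          sub.insert (keys.getD j "") (dd.getD (keys.getD j "") "")
        else sub) PySem.Dict.empty).items)

-- ===== PRECONDITION & SPEC =====
def Spec_powersetdic (d : List (String × String)) (out : List (List (String × String))) : Prop := out = powersetdic_alt d
instance (d : List (String × String)) (out : List (List (String × String))) : Decidable (Spec_powersetdic d out) := by unfold Spec_powersetdic; infer_instance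

-- ===== CLAIM (what is proved, stated in full; the proofs are below) =====
def Claim_equal_powersetdic : Prop := ∀ (d : List (String × String)), Dom_powersetdic d → Spec_powersetdic d (powersetdic d)

-- ===== LEMMAS AND PROOFS =====

-- A's doubling loop, as a standalone function of the key list
def pvSubs (ks : List String) : List (List String) :=
  ks.foldl (fun r e => r ++ r.map (fun ls => ls ++ [e])) [[]]

-- B's bitmask selection of a key-list, and the whole bitmask enumeration
def pvBitsel (ks : List String) (i : Nat) : List String :=
  (List.range ks.length).filterMap (fun j => if (i >>> j) % 2 = 1 then some (ks.getD j "") else none)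

def pvBitm (ks : List String) : List (List String) :=
  (List.range (2 ^ ks.length)).map (pvBitsel ks)

-- the dict built from a key-list (shared by both ports)
def pvMk (dd : PySem.Dict String String) (b : List String) : List (String × String) :=
  (b.foldl (fun sub key => sub.insert key (dd.getD key "")) PySem.Dict.empty).items

theorem pvSubs_append (ks : List String) (e : String) :
    pvSubs (ks ++ [e]) = pvSubs ks ++ (pvSubs ks).map (fun ls => ls ++ [e]) := by
  simp [pvSubs]

theorem pvSubs_shape (ks : List String) :
    ∃ t, pvSubs ks = [] :: t ∧ ∀ b ∈ t, b ≠ [] := by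
  induction ks using List.reverseRecOn with
  | nil => exact ⟨[], rfl, by simp⟩
  | append_singleton ks e ih =>
    obtain ⟨t, ht, hne⟩ := ih
    refine ⟨t ++ (pvSubs ks).map (fun ls => ls ++ [e]), by rw [pvSubs_append, ht]; simp, ?_⟩
    intro b hb
    rcases List.mem_append.mp hb with h | h
    · exact hne b h
    · obtain ⟨ls, _, rfl⟩ := List.mem_map.mp h
      simp

theorem pvBitsel_low (ks : List String) (e : String) (i : Nat) (hi : i < 2 ^ ks.length) :
    pvBitsel (ks ++ [e]) i = pvBitsel ks i := by
  unfold pvBitsel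
  rw [List.length_append, List.length_singleton, List.range_succ, List.filterMap_append]
  have h0 : i >>> ks.length = 0 := by
    rw [Nat.shiftRight_eq_div_pow]
    exact Nat.div_eq_of_lt hi
  have hlast : ([ks.length].filterMap
      (fun j => if (i >>> j) % 2 = 1 then some ((ks ++ [e]).getD j "") else none)) = [] := by
    simp [h0]
  rw [hlast, List.append_nil]
  apply List.filterMap_congr
  intro j hj
  have hj' : j < ks.length := List.mem_range.mp hj
  rw [List.getD_append _ _ _ _ hj']

theorem pvBitsel_high (ks : List String) (e : String) (i : Nat) (hi : i < 2 ^ ks.length) :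
    pvBitsel (ks ++ [e]) (2 ^ ks.length + i) = pvBitsel ks i ++ [e] := by
  unfold pvBitsel
  rw [List.length_append, List.length_singleton, List.range_succ, List.filterMap_append]
  have hbit : ∀ j : Nat, j < ks.length →
      ((2 ^ ks.length + i) >>> j) % 2 = (i >>> j) % 2 := by
    intro j hj
    rw [Nat.shiftRight_eq_div_pow, Nat.shiftRight_eq_div_pow]
    have hpow : 2 ^ ks.length = 2 ^ j * 2 ^ (ks.length - j) := by
      rw [← pow_add]; congr 1; omega
    rw [hpow, Nat.mul_add_div (Nat.two_pow_pos j) _]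
    have heven : 2 ^ (ks.length - j) % 2 = 0 := by
      have : 1 ≤ ks.length - j := by omega
      rcases Nat.exists_eq_add_of_le this with ⟨m, hm⟩
      rw [hm, pow_add, pow_one]
      omega
    omega
  have hlastbit : ((2 ^ ks.length + i) >>> ks.length) % 2 = 1 := by
    rw [Nat.shiftRight_eq_div_pow, Nat.add_div_left _ (Nat.two_pow_pos _),
        Nat.div_eq_of_lt hi]
  have hlast : ([ks.length].filterMap
      (fun j => if ((2 ^ ks.length + i) >>> j) % 2 = 1 then some ((ks ++ [e]).getD j "") else none))
      = [e] := by
    simp [hlastbit, List.getD]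
  rw [hlast]
  congr 1
  apply List.filterMap_congr
  intro j hj
  have hj' : j < ks.length := List.mem_range.mp hj
  rw [hbit j hj', List.getD_append _ _ _ _ hj']

theorem pvBitm_eq_pvSubs (ks : List String) : pvBitm ks = pvSubs ks := by
  induction ks using List.reverseRecOn with
  | nil => rfl
  | append_singleton ks e ih =>
    rw [pvSubs_append, ← ih]
    unfold pvBitm
    rw [List.length_append, List.length_singleton, pow_succ, Nat.mul_two, List.range_add,
        List.map_append, List.map_map]
    congr 1
    · apply List.map_congr_left
      intro i hi
      exact pvBitsel_low ks e i (List.mem_range.mp hi)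
    · rw [List.map_map]
      apply List.map_congr_left
      intro i hi
      exact pvBitsel_high ks e i (List.mem_range.mp hi)

-- turning a guarded fold into a fold over the selected elements
theorem foldl_if_filterMap {α β γ : Type} (q : β → Prop) [DecidablePred q] (h : β → γ)
    (g : α → γ → α) (l : List β) (init : α) :
    l.foldl (fun s j => if q j then g s (h j) else s) init
      = (l.filterMap (fun j => if q j then some (h j) else none)).foldl g init := by
  induction l generalizing init with
  | nil => rfl
  | cons x xs ih =>
    by_cases hx : q x <;> simp [hx, ih]

-- a fold that appends the image of every element passing a test
theorem foldl_append_if_map {α β : Type} (p : α → Prop) [DecidablePred p] (g : α → β)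
    (l : List α) (init : List β) :
    l.foldl (fun rd b => if p b then rd ++ [g b] else rd) init
      = init ++ (l.filter (fun b => decide (p b))).map g := by
  induction l generalizing init with
  | nil => simp
  | cons x xs ih =>
    by_cases hx : p x <;> simp [hx, ih]

theorem powersetdic_eq_map (d : List (String × String)) :
    powersetdic d = (pvSubs (PySem.Dict.ofList d).keys).map (pvMk (PySem.Dict.ofList d)) := by
  simp only [powersetdic]
  rw [show (((PySem.Dict.ofList d).keys).foldl
        (fun r e => r ++ r.map (fun ls => ls ++ [e])) [[]]) = pvSubs (PySem.Dict.ofList d).keys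
      from rfl]
  rw [foldl_append_if_map (fun b : List String => b.length > 0)
      (fun b : List String =>
        (b.foldl (fun sub key => sub.insert key ((PySem.Dict.ofList d).getD key ""))
          PySem.Dict.empty).items)
      (pvSubs (PySem.Dict.ofList d).keys) [[]]]
  obtain ⟨t, ht, hne⟩ := pvSubs_shape (PySem.Dict.ofList d).keys
  rw [ht]
  have hfil : (([] : List String) :: t).filter (fun b => decide (b.length > 0)) = t := by
    rw [List.filter_cons]
    simp only [List.length_nil, gt_iff_lt, Nat.lt_irrefl, decide_false, Bool.false_eq_true,
      if_false]
    apply List.filter_eq_self.mpr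
    intro b hb
    have := hne b hb
    simp [List.length_pos_iff]
    exact this
  rw [hfil, List.map_cons]
  rfl

theorem powersetdic_alt_eq_map (d : List (String × String)) :
    powersetdic_alt d = (pvBitm (PySem.Dict.ofList d).keys).map (pvMk (PySem.Dict.ofList d)) := by
  simp only [powersetdic_alt, pvBitm]
  rw [List.map_map]
  apply List.map_congr_left
  intro i _
  rw [foldl_if_filterMap (fun j => (i >>> j) % 2 = 1)
      (fun j => ((PySem.Dict.ofList d).keys).getD j "")
      (fun sub k => sub.insert k ((PySem.Dict.ofList d).getD k ""))
      (List.range (PySem.Dict.ofList d).keys.length) PySem.Dict.empty]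
  rfl

-- ===== VERDICT (by name: the statement is the Claim_ definition above) =====
theorem powersetdic_spec : Claim_equal_powersetdic := by
  intro d _
  unfold Spec_powersetdic
  rw [powersetdic_eq_map, powersetdic_alt_eq_map, pvBitm_eq_pvSubs]
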